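-- pv_equiv track=rewrite | github.com/pypi-data/pypi-mirror-342 | packages/CNZ/cnz-0.1.0.tar.gz/cnz-0.1.0/src/CNZ/codeop_simpl_subex.py | eliminate_common
-- ===== SOURCE A (Python) =====
-- def eliminate_common(expr_list):
--     temp_map = {}
--     optimized = []
--     for expr in expr_list:
--         if expr in temp_map:
--             optimized.append(f"{temp_map[expr]}")
--         else:
--             t = f"T{len(temp_map)+1}"
--             temp_map[expr] = t
--             optimized.append(f"{t} = {expr}")
--     return optimized
-- ===== SOURCE B (Python) =====
-- def eliminate_common(expr_list):
--     # pass 1: assign a temp name to each distinct expression, in first-occurrence order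
--     names = {}
--     for expr in expr_list:
--         if expr not in names:
--             names[expr] = f"T{len(names)+1}"
--     # pass 2: render; an expression already emitted is referenced by its name only
--     emitted = set()
--     out = []
--     for expr in expr_list:
--         name = names[expr]
--         if expr in emitted:
--             out.append(name)
--         else:
--             emitted.add(expr)
--             out.append(f"{name} = {expr}")
--     return out
-- ===== Notes on version B (the rewrite author's own statement) =====
-- stated objective: alternative
-- what changed: B replaces A's single interleaved loop by two separate passes: one builds the full expression-to-temp-name table first, then a second pass renders the output using the table and an emitted set.
import Mathlib
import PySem

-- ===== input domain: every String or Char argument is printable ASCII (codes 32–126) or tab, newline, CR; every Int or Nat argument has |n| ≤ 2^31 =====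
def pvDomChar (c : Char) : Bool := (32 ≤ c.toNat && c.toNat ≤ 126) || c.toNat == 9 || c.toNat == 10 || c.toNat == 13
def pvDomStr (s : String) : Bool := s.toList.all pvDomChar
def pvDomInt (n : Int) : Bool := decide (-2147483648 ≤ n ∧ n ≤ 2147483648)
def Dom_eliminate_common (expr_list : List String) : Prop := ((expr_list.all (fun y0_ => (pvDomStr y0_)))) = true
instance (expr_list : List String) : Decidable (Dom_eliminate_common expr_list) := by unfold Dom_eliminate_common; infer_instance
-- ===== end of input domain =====

-- B builds the full expression→temp-name table in a first pass, then renders in a second pass;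
-- A interleaves naming and rendering in one loop.  Return values proved equal on all inputs.

-- ===== PORT A =====
def eliminate_common (expr_list : List String) : List String :=
  (expr_list.foldl
    (fun (st : PySem.Dict String String × List String) expr =>
      match st.1.get? expr with
      | some t => (st.1, st.2 ++ [t])
      | none =>
        let t := "T" ++ PySem.Int.toStr ((st.1.size : Int) + 1)
        (st.1.insert expr t, st.2 ++ [t ++ " = " ++ expr]))
    (PySem.Dict.empty, [])).2

-- ===== PORT B =====
-- pass 1 of Source B: the naming table
def buildNames (expr_list : List String) : PySem.Dict String String :=
  expr_list.foldl
    (fun names expr =>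
      if names.contains expr then names
      else names.insert expr ("T" ++ PySem.Int.toStr ((names.size : Int) + 1)))
    PySem.Dict.empty

def eliminate_common_alt (expr_list : List String) : List String :=
  let names := buildNames expr_list
  (expr_list.foldl
    (fun (st : PySem.Set String × List String) expr =>
      let name := (names.get? expr).getD ""   -- names[expr]; key always present (assigned in pass 1)
      if st.1.contains expr then (st.1, st.2 ++ [name])
      else (st.1.add expr, st.2 ++ [name ++ " = " ++ expr]))
    (PySem.Set.empty, [])).2

-- ===== PRECONDITION & SPEC =====
def Spec_eliminate_common (expr_list : List String) (out : List String) : Prop := out = eliminate_common_alt expr_list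
instance (expr_list : List String) (out : List String) : Decidable (Spec_eliminate_common expr_list out) := by unfold Spec_eliminate_common; infer_instance

-- ===== CLAIM (what is proved, stated in full; the proofs are below) =====
def Claim_equal_eliminate_common : Prop := ∀ (expr_list : List String), Dom_eliminate_common expr_list → Spec_eliminate_common expr_list (eliminate_common expr_list)

-- ===== LEMMAS AND PROOFS =====

-- one step of buildNames
def bstep (names : PySem.Dict String String) (expr : String) : PySem.Dict String String :=
  if names.contains expr then names
  else names.insert expr ("T" ++ PySem.Int.toStr ((names.size : Int) + 1))

theorem buildNames_eq_foldl (l : List String) (d : PySem.Dict String String) :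
    l.foldl (fun names expr =>
      if names.contains expr then names
      else names.insert expr ("T" ++ PySem.Int.toStr ((names.size : Int) + 1))) d
      = l.foldl bstep d := rfl

-- lookups already present survive the rest of pass 1
theorem get?_foldl_bstep (l : List String) (d : PySem.Dict String String) (e : String)
    (v : String) (h : d.get? e = some v) : (l.foldl bstep d).get? e = some v := by
  induction l generalizing d with
  | nil => exact h
  | cons x xs ih =>
    apply ih
    unfold bstep
    split
    · exact h
    · rename_i hc
      rcases eq_or_ne e x with rfl | hne
      · rw [PySem.Dict.contains_eq_isSome_get?, h] at hc; simp at hc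
      · rw [PySem.Dict.get?_insert_of_ne _ _ hne]; exact h

theorem eliminate_common_main (names : PySem.Dict String String) :
    ∀ (rest : List String) (tm : PySem.Dict String String) (em : PySem.Set String)
      (acc : List String),
      (∀ e v, (rest.foldl bstep tm).get? e = some v → names.get? e = some v) →
      (∀ e, em.contains e = (tm.get? e).isSome) →
      (rest.foldl
        (fun (st : PySem.Dict String String × List String) expr =>
          match st.1.get? expr with
          | some t => (st.1, st.2 ++ [t])
          | none =>
            let t := "T" ++ PySem.Int.toStr ((st.1.size : Int) + 1)
            (st.1.insert expr t, st.2 ++ [t ++ " = " ++ expr])) (tm, acc)).2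
      = (rest.foldl
          (fun (st : PySem.Set String × List String) expr =>
            let name := (names.get? expr).getD ""
            if st.1.contains expr then (st.1, st.2 ++ [name])
            else (st.1.add expr, st.2 ++ [name ++ " = " ++ expr])) (em, acc)).2 := by
  intro rest
  induction rest with
  | nil => intro tm em acc _ _; rfl
  | cons x xs ih =>
    intro tm em acc H hem
    simp only [List.foldl]
    rcases htm : tm.get? x with _ | t
    · -- x is fresh: both sides emit "name = expr"
      have hbx : bstep tm x = tm.insert x ("T" ++ PySem.Int.toStr ((tm.size : Int) + 1)) := by
        unfold bstep
        rw [PySem.Dict.contains_eq_isSome_get?, htm]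
        simp
      have hfold : (x :: xs).foldl bstep tm = xs.foldl bstep (bstep tm x) := rfl
      have hname : names.get? x = some ("T" ++ PySem.Int.toStr ((tm.size : Int) + 1)) := by
        apply H
        rw [hfold, hbx]
        exact get?_foldl_bstep xs _ x _ (PySem.Dict.get?_insert_self tm x _)
      have hcx : em.contains x = false := by rw [hem, htm]; rfl
      simp only [hcx, hname, if_neg (Bool.false_ne_true), Option.getD_some]
      apply ih
      · intro e v hv
        apply H
        rwa [hfold, hbx]
      · intro e
        rcases eq_or_ne e x with rfl | hne
        · rw [PySem.Dict.get?_insert_self]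
          simp [PySem.Set.contains, PySem.Set.add]
          split <;> simp_all
        · rw [PySem.Dict.get?_insert_of_ne _ _ hne, ← hem]
          simp only [PySem.Set.contains, PySem.Set.add]
          split
          · rfl
          · simp [hne]
    · -- x was seen: both sides emit just the name
      have hbx : bstep tm x = tm := by
        unfold bstep
        rw [PySem.Dict.contains_eq_isSome_get?, htm]
        simp
      have hfold : (x :: xs).foldl bstep tm = xs.foldl bstep tm := by
        simp [List.foldl, hbx]
      have hname : names.get? x = some t := by
        apply H
        rw [hfold]
        exact get?_foldl_bstep xs tm x t htm
      have hcx : em.contains x = true := by rw [hem, htm]; rfl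
      simp only [hcx, hname, Option.getD_some]
      apply ih
      · intro e v hv; apply H; rwa [hfold]
      · exact hem

-- ===== VERDICT (by name: the statement is the Claim_ definition above) =====
theorem eliminate_common_spec : Claim_equal_eliminate_common := by
  intro expr_list _
  unfold Spec_eliminate_common eliminate_common eliminate_common_alt
  exact eliminate_common_main (buildNames expr_list) expr_list PySem.Dict.empty
    PySem.Set.empty []
    (fun e v h => by rwa [buildNames, buildNames_eq_foldl] )
    (fun e => by simp [PySem.Set.empty, PySem.Set.contains, PySem.Dict.get?_empty])
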